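-- pv_equiv track=rewrite | github.com/Byeto-Company/HealthCareBackend | customer/models.py | convert_to_persian_numbers
-- ===== SOURCE A (Python) =====
-- def convert_to_persian_numbers(date_string):
--     # Mapping of English digits to Persian digits
--     english_to_persian = {
--         '0': '۰',
--         '1': '۱',
--         '2': '۲',
--         '3': '۳',
--         '4': '۴',
--         '5': '۵',
--         '6': '۶',
--         '7': '۷',
--         '8': '۸',
--         '9': '۹'
--     }
--
--     # Replace each English digit with its Persian equivalent
--     persian_date_string = ''.join(english_to_persian.get(char, char) for char in date_string)
--
--     return persian_date_string
-- ===== SOURCE B (Python) =====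
-- def convert_to_persian_numbers(date_string):
--     # Staged rewriting: run ten whole-string replace passes, one per digit,
--     # instead of a single per-character table lookup pass.
--     result = date_string
--     for eng, per in zip('0123456789', '\u06F0\u06F1\u06F2\u06F3\u06F4\u06F5\u06F6\u06F7\u06F8\u06F9'):
--         result = result.replace(eng, per)
--     return result
-- ===== Notes on version B (the rewrite author's own statement) =====
-- stated objective: faster
-- what changed: Replaces A's single per-character pass with a dict lookup by ten staged whole-string str.replace passes, one per digit; correct because the Persian digits introduced are never rewritten by later passes, and faster because each pass runs in C instead of a per-character Python generator.
import Mathlib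
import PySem

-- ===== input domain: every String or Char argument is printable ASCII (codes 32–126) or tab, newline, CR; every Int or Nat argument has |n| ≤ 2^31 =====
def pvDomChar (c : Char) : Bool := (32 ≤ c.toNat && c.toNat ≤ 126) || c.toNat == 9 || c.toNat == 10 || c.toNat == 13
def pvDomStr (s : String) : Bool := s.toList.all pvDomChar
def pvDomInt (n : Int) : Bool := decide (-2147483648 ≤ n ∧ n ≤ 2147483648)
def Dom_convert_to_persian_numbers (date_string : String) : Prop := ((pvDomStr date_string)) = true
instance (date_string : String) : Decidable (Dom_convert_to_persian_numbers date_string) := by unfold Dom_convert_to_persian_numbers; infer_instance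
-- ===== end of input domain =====

-- B replaces A's single per-character dict-lookup pass by ten staged whole-string replace
-- passes (one per digit); a timing run measured B faster by a constant factor.

-- ===== PORT A =====
-- A's dict maps one-character strings to one-character strings and every joined piece is a
-- single character, so it is ported exactly at the Char level: ''.join of the per-character
-- pieces is String.ofList of the per-character results.
def englishToPersian : PySem.Dict Char Char :=
  PySem.Dict.ofList [('0','۰'),('1','۱'),('2','۲'),('3','۳'),('4','۴'),
                     ('5','۵'),('6','۶'),('7','۷'),('8','۸'),('9','۹')]

def convert_to_persian_numbers (date_string : String) : String :=
  -- persian_date_string = ''.join(english_to_persian.get(char, char) for char in date_string)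
  String.ofList (date_string.toList.map (fun char => (englishToPersian.get? char).getD char))

-- ===== PORT B =====
def convert_to_persian_numbers_alt (date_string : String) : String :=
  -- result = date_string
  -- for eng, per in zip('0123456789', '۰۱۲۳۴۵۶۷۸۹'): result = result.replace(eng, per)
  -- (zip of two strings iterates pairs of their characters, each a one-character string)
  (List.zip "0123456789".toList "۰۱۲۳۴۵۶۷۸۹".toList).foldl
    (fun result ep => PySem.Str.replace result (String.singleton ep.1) (String.singleton ep.2))
    date_string

-- ===== PRECONDITION & SPEC =====
def Spec_convert_to_persian_numbers (date_string : String) (out : String) : Prop := out = convert_to_persian_numbers_alt date_string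
instance (date_string : String) (out : String) : Decidable (Spec_convert_to_persian_numbers date_string out) := by unfold Spec_convert_to_persian_numbers; infer_instance

-- ===== CLAIM (what is proved, stated in full; the proofs are below) =====
def Claim_equal_convert_to_persian_numbers : Prop := ∀ (date_string : String), Dom_convert_to_persian_numbers date_string → Spec_convert_to_persian_numbers date_string (convert_to_persian_numbers date_string)

-- ===== LEMMAS AND PROOFS =====

-- replace with a one-character pattern and a one-character replacement is a character map
lemma pvReplace_single (o r : Char) (l : List Char) :
    PySem.Chars.replace l [o] [r] = l.map (fun c => if c = o then r else c) := by
  suffices h : ∀ fuel (l acc : List Char), l.length ≤ fuel →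
      PySem.Chars.replace.go [o] [r] fuel l acc = acc.reverse ++ l.map (fun c => if c = o then r else c) by
    simpa [PySem.Chars.replace] using h l.length l [] le_rfl
  intro fuel
  induction fuel with
  | zero =>
    intro l acc h
    interval_cases hl : l.length
    · simp [List.length_eq_zero_iff.mp hl, PySem.Chars.replace.go]
  | succ n ih =>
    intro l acc h
    cases l with
    | nil => simp [PySem.Chars.replace.go]
    | cons c t =>
      by_cases hc : c = o
      · subst hc
        have hp : List.isPrefixOf [c] (c :: t) = true := by simp [List.isPrefixOf]
        simp only [PySem.Chars.replace.go, hp, if_pos]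
        rw [ih _ _ (by simpa using h)]
        simp
      · have hp : List.isPrefixOf [o] (c :: t) = false := by simp [List.isPrefixOf, Ne.symm hc]
        simp only [PySem.Chars.replace.go, hp]
        rw [if_neg (by simp)]
        rw [ih _ _ (by simpa using h)]
        simp [hc]

-- per-character agreement between A's dict lookup and the composition of B's ten rewrites
def pvStep (o r : Char) (c : Char) : Char := if c = o then r else c

lemma pvChain_eq (c : Char) :
    pvStep '9' '۹' (pvStep '8' '۸' (pvStep '7' '۷' (pvStep '6' '۶' (pvStep '5' '۵'
      (pvStep '4' '۴' (pvStep '3' '۳' (pvStep '2' '۲' (pvStep '1' '۱' (pvStep '0' '۰' c))))))))) =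
    (englishToPersian.get? c).getD c := by
  by_cases h0 : c = '0'; · subst h0; decide
  by_cases h1 : c = '1'; · subst h1; decide
  by_cases h2 : c = '2'; · subst h2; decide
  by_cases h3 : c = '3'; · subst h3; decide
  by_cases h4 : c = '4'; · subst h4; decide
  by_cases h5 : c = '5'; · subst h5; decide
  by_cases h6 : c = '6'; · subst h6; decide
  by_cases h7 : c = '7'; · subst h7; decide
  by_cases h8 : c = '8'; · subst h8; decide
  by_cases h9 : c = '9'; · subst h9; decide
  rw [show englishToPersian =
        PySem.Dict.mk [('0','۰'),('1','۱'),('2','۲'),('3','۳'),('4','۴'),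
                       ('5','۵'),('6','۶'),('7','۷'),('8','۸'),('9','۹')] from by decide]
  simp [pvStep, h0, h1, h2, h3, h4, h5, h6, h7, h8, h9, PySem.Dict.get?,
        Ne.symm h0, Ne.symm h1, Ne.symm h2, Ne.symm h3, Ne.symm h4,
        Ne.symm h5, Ne.symm h6, Ne.symm h7, Ne.symm h8, Ne.symm h9]

-- the ten staged replace passes compute, characterwise, the composed rewrite chain
lemma pvAlt_toList (s : String) :
    (convert_to_persian_numbers_alt s).toList =
      s.toList.map (fun c =>
        pvStep '9' '۹' (pvStep '8' '۸' (pvStep '7' '۷' (pvStep '6' '۶' (pvStep '5' '۵'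
          (pvStep '4' '۴' (pvStep '3' '۳' (pvStep '2' '۲' (pvStep '1' '۱' (pvStep '0' '۰' c)))))))))) := by
  unfold convert_to_persian_numbers_alt
  rw [show List.zip "0123456789".toList "۰۱۲۳۴۵۶۷۸۹".toList =
        [('0','۰'),('1','۱'),('2','۲'),('3','۳'),('4','۴'),
         ('5','۵'),('6','۶'),('7','۷'),('8','۸'),('9','۹')] from by decide]
  simp only [List.foldl_cons, List.foldl_nil]
  simp only [PySem.Str.toList_replace, String.toList_singleton, pvReplace_single, List.map_map]
  simp [pvStep, Function.comp_def]

-- ===== VERDICT (by name: the statement is the Claim_ definition above) =====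
theorem convert_to_persian_numbers_spec : Claim_equal_convert_to_persian_numbers := by
  intro s _
  unfold Spec_convert_to_persian_numbers
  have h : (convert_to_persian_numbers s).toList = (convert_to_persian_numbers_alt s).toList := by
    rw [pvAlt_toList]
    unfold convert_to_persian_numbers
    rw [String.toList_ofList]
    exact List.map_congr_left fun c _ => (pvChain_eq c).symm
  have := congrArg String.ofList h
  simpa using this
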